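-- pv_equiv track=rewrite | github.com/kganjam/arc-agi-2-solver | patterns/feature_detector.py | _check_alternating_columns
-- ===== SOURCE A (Python) =====
-- from typing import List, Dict, Tuple, Any, Optional
--
-- def _check_alternating_columns(cols: List[Tuple]) -> bool:
--     """Check if columns alternate between two patterns"""
--     if len(cols) < 2:
--         return False
--
--     pattern1, pattern2 = cols[0], cols[1]
--     if pattern1 == pattern2:
--         return False
--
--     for i, col in enumerate(cols):
--         expected = pattern1 if i % 2 == 0 else pattern2
--         if col != expected:
--             return False
--
--     return True
-- ===== SOURCE B (Python) =====
-- def _check_alternating_columns(cols):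
--     """Check if columns alternate between two patterns (parity-slice version)."""
--     if len(cols) < 2:
--         return False
--     pattern1, pattern2 = cols[0], cols[1]
--     if pattern1 == pattern2:
--         return False
--     return (all(c == pattern1 for c in cols[0::2])
--             and all(c == pattern2 for c in cols[1::2]))
-- ===== Notes on version B (the rewrite author's own statement) =====
-- stated objective: alternative
-- what changed: Replaced the single interleaved enumerate-loop with an i%2 branch by two separate passes over the even- and odd-indexed column subsequences obtained by parity slicing.
import Mathlib
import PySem

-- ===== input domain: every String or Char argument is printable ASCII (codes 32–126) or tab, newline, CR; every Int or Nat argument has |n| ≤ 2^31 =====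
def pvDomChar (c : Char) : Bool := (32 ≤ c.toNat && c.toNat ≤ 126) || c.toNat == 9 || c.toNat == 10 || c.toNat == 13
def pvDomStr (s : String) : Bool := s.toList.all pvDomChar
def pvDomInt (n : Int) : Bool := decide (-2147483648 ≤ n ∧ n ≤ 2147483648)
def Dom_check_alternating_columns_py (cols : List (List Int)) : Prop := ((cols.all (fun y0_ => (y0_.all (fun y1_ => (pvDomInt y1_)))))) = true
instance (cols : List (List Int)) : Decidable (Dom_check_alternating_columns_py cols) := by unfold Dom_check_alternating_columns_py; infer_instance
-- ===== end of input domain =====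

-- B replaces A's single interleaved enumerate-loop (i % 2 branch) by two passes over
-- the even- and odd-indexed column subsequences (parity slices); same behaviour, same cost.

-- ===== PORT A =====
-- the 'for i, col in enumerate(cols)' loop with early return False
def pvALoop (p1 p2 : List Int) : List (Int × List Int) → Bool
  | [] => true
  | (i, col) :: rest =>
    let expected := if i % 2 == 0 then p1 else p2  -- Int.% = Python % for the positive divisor 2
    if col != expected then false else pvALoop p1 p2 rest

def check_alternating_columns_py (cols : List (List Int)) : Bool :=
  if cols.length < 2 then false
  else
    match cols with
    | pattern1 :: pattern2 :: _ =>
      if pattern1 == pattern2 then false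
      else pvALoop pattern1 pattern2 (PySem.List.enumerate cols 0)
    | _ => false

-- ===== PORT B =====
-- xs[0::2] (for xs.tail, this also gives xs[1::2])
def pvEveryOther : List (List Int) → List (List Int)
  | [] => []
  | [x] => [x]
  | x :: _ :: rest => x :: pvEveryOther rest

def check_alternating_columns_py_alt (cols : List (List Int)) : Bool :=
  if cols.length < 2 then false
  else
    let pattern1 := cols.headD []      -- cols[0]; the length guard makes headD safe
    let pattern2 := cols.tail.headD [] -- cols[1]
    if pattern1 == pattern2 then false
    else (pvEveryOther cols).all (· == pattern1)
           && (pvEveryOther cols.tail).all (· == pattern2)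

-- ===== PRECONDITION & SPEC =====
def Spec_check_alternating_columns_py (cols : List (List Int)) (out : Bool) : Prop := out = check_alternating_columns_py_alt cols
instance (cols : List (List Int)) (out : Bool) : Decidable (Spec_check_alternating_columns_py cols out) := by unfold Spec_check_alternating_columns_py; infer_instance

-- ===== CLAIM (what is proved, stated in full; the proofs are below) =====
def Claim_equal_check_alternating_columns_py : Prop := ∀ (cols : List (List Int)), Dom_check_alternating_columns_py cols → Spec_check_alternating_columns_py cols (check_alternating_columns_py cols)

-- ===== LEMMAS AND PROOFS =====

-- ===== VERDICT (by name: the statement is the Claim_ definition above) =====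
lemma pvEveryOther_cons (a : List Int) (l : List (List Int)) :
    pvEveryOther (a :: l) = a :: pvEveryOther l.tail := by
  cases l <;> simp [pvEveryOther]

theorem pvALoop_enumerate (p1 p2 : List Int) :
    ∀ (cols : List (List Int)) (k : Nat),
      pvALoop p1 p2 (PySem.List.enumerate cols (2 * (k : Int))) =
        ((pvEveryOther cols).all (· == p1) && (pvEveryOther cols.tail).all (· == p2))
  | [], _ => by simp [PySem.List.enumerate, pvALoop, pvEveryOther]
  | [x], k => by
    have h0 : (2 * (k : Int)) % 2 = 0 := by omega
    simp [PySem.List.enumerate, pvALoop, pvEveryOther, h0]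
    cases hx : x == p1 <;> simp_all
  | x :: y :: rest, k => by
    have ih := pvALoop_enumerate p1 p2 rest (k + 1)
    have h0 : (2 * (k : Int)) % 2 = 0 := by omega
    have h1 : ¬ ((2 * (k : Int) + 1) % 2 = 0) := by omega
    have hcast : (2 * (k : Int)) + 1 + 1 = 2 * ((k : Int) + 1) := by ring
    simp only [PySem.List.enumerate, pvALoop, h0, pvEveryOther, hcast,
      List.tail_cons]
    rw [show ((k : Int) + 1) = ((k + 1 : Nat) : Int) by push_cast; ring, ih,
      pvEveryOther_cons y rest]
    simp [bne]
    cases hx : x == p1 <;> cases hy : y == p2 <;> simp_all [Bool.and_comm]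

-- ===== VERDICT =====
theorem check_alternating_columns_py_spec : Claim_equal_check_alternating_columns_py := by
  intro cols _
  unfold Spec_check_alternating_columns_py
  match cols with
  | [] => rfl
  | [a] => rfl
  | a :: b :: rest =>
    have h := pvALoop_enumerate a b (a :: b :: rest) 0
    simp only [Nat.cast_zero, mul_zero] at h
    simp only [check_alternating_columns_py, check_alternating_columns_py_alt,
      List.tail_cons, List.headD_cons, h]
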